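-- pv_equiv track=rewrite | github.com/study-Algoringo/swjungle_PS | suhyun/42586.py | solution
-- ===== SOURCE A (Python) =====
-- from collections import deque
-- import math
--
-- def solution(progresses, speeds):
--     answer = []
--     nocomplete = deque()
--
--     for i in range(len(speeds)):
--         nocomplete.append(math.ceil((100-progresses[i])/speeds[i]))
--
--     a = nocomplete.popleft()
--     cnt = 1
--     while nocomplete:
--         if nocomplete[0] > a:
--             answer.append(cnt)
--             a = nocomplete.popleft()
--             cnt=1
--         else:
--             nocomplete.popleft()
--             cnt+=1
--     answer.append(cnt)
--     return answer
-- ===== SOURCE B (Python) =====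
-- def solution(progresses, speeds):
--     # staged pipeline: days -> prefix maxima -> run-length encode.
--     # A batch's completion day is the running max of the days seen so far,
--     # and a new batch starts exactly when that running max strictly increases,
--     # so the answer is the run lengths of the prefix-maxima sequence.
--     days = [-((p - 100) // s) for p, s in zip(progresses, speeds)]  # exact ceil((100-p)/s)
--     maxima = []
--     m = days[0]
--     for d in days:
--         if d > m:
--             m = d
--         maxima.append(m)
--     answer = []
--     xs = maxima
--     while xs:
--         run = 1
--         while run < len(xs) and xs[run] == xs[0]:
--             run += 1
--         answer.append(run)
--         xs = xs[run:]
--     return answer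
-- ===== Notes on version B (the rewrite author's own statement) =====
-- stated objective: alternative
-- what changed: B replaces A's stateful grouping loop (current batch day + counter, consuming a deque) by a staged pipeline: compute the prefix-maxima sequence of the completion days, then run-length encode it; a batch is exactly a maximal run of equal prefix maxima.
import Mathlib
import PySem

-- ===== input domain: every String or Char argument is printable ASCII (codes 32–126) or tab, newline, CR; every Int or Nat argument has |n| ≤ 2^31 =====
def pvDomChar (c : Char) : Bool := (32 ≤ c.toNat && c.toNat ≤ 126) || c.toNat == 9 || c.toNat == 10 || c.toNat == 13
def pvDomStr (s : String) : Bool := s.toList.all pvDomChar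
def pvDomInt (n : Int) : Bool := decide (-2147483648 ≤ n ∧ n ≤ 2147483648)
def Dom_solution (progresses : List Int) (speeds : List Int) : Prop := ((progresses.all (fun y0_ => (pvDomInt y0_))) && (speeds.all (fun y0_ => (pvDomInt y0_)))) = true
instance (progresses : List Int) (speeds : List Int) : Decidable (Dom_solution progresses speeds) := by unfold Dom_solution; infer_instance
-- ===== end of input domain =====

-- B replaces A's stateful grouping loop by a staged pipeline: prefix maxima of the
-- completion days, then run-length encoding (objective: alternative, same cost).

-- ===== PORT A =====
-- math.ceil((100-p)/s) ported as exact integer ceiling division: exact on Dom_solution since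
-- |100-p| < 2^33 ≪ 2^53, so the correctly-rounded float quotient ceils to the exact ceiling.
def pyCeil100 (p s : Int) : Int := -(PySem.Int.floordiv (-(100 - p)) s)

-- the 'for i in range(len(speeds)): nocomplete.append(...)' loop; none = IndexError/ZeroDivisionError
def buildStep (progresses speeds : List Int) (acc : Option (List Int)) (i : Int) : Option (List Int) :=
  match acc with
  | none => none
  | some ds =>
    match PySem.List.pyGet? progresses i, PySem.List.pyGet? speeds i with
    | some p, some s => if s = 0 then none else some (ds ++ [pyCeil100 p s])
    | _, _ => none

-- the 'while nocomplete:' loop, state (deque, a, cnt, answer)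
def groupLoop : List Int → Int → Int → List Int → List Int
  | [], _, cnt, answer => answer ++ [cnt]
  | d :: rest, a, cnt, answer =>
    if d > a then groupLoop rest d 1 (answer ++ [cnt])
    else groupLoop rest a (cnt + 1) answer

def solution (progresses : List Int) (speeds : List Int) : List Int :=
  match (PySem.List.pyRange 0 (speeds.length : Int) 1).foldl (buildStep progresses speeds) (some []) with
  | none => []          -- an index/zero-division error: excluded by Pre_solution
  | some [] => []       -- popleft from an empty deque raises: excluded by Pre_solution
  | some (d :: rest) => groupLoop rest d 1 []

-- ===== PORT B =====
-- B's 'for d in days' loop building the prefix-maxima list; state (m, maxima)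
def pmaxStep (st : Int × List Int) (d : Int) : Int × List Int :=
  let m := if d > st.1 then d else st.1
  (m, st.2 ++ [m])

-- B's outer while loop: the inner 'while run < len(xs) and xs[run] == xs[0]' scan is the
-- takeWhile of the tail, and 'xs = xs[run:]' is the matching dropWhile of the tail.
def rleLoop : List Int → List Int
  | [] => []
  | x :: xs =>
    (1 + ((xs.takeWhile (· == x)).length : Int)) :: rleLoop (xs.dropWhile (· == x))
  termination_by xs => xs.length
  decreasing_by simpa using Nat.lt_succ_of_le (List.length_dropWhile_le _ _)

def solution_alt (progresses : List Int) (speeds : List Int) : List Int :=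
  let days := (progresses.zip speeds).map (fun q => -(PySem.Int.floordiv (q.1 - 100) q.2))
  match days with
  | [] => []            -- days[0] raises IndexError: excluded by Pre_solution
  | d0 :: _ => rleLoop (days.foldl pmaxStep (d0, [])).2

-- ===== PRECONDITION & SPEC =====
-- Pre_ excludes exactly the inputs where A raises: empty speeds (popleft IndexError),
-- progresses shorter than speeds (IndexError), and a zero speed (ZeroDivisionError).
def Pre_solution (progresses : List Int) (speeds : List Int) : Prop :=
  speeds ≠ [] ∧ speeds.length ≤ progresses.length ∧ ∀ s ∈ speeds, s ≠ 0
instance (progresses : List Int) (speeds : List Int) : Decidable (Pre_solution progresses speeds) := by unfold Pre_solution; infer_instance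

def pvWitness_solution : List Int × List Int := ([93, 30, 55], [1, 30, 5])

def Spec_solution (progresses : List Int) (speeds : List Int) (out : List Int) : Prop := out = solution_alt progresses speeds
instance (progresses : List Int) (speeds : List Int) (out : List Int) : Decidable (Spec_solution progresses speeds out) := by unfold Spec_solution; infer_instance

-- ===== CLAIM (what is proved, stated in full; the proofs are below) =====
def Claim_equal_solution : Prop := ∀ (progresses : List Int) (speeds : List Int), Dom_solution progresses speeds → Pre_solution progresses speeds → Spec_solution progresses speeds (solution progresses speeds)

-- ===== LEMMAS AND PROOFS =====

-- B's per-task day equals A's ported ceiling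
lemma day_eq (p s : Int) : -(PySem.Int.floordiv (p - 100) s) = pyCeil100 p s := by
  unfold pyCeil100; ring_nf

-- A's build loop, started at index k, yields the mapped zip of the two tails
lemma build_eq (ps ss : List Int) (hlen : ss.length ≤ ps.length) (hz : ∀ s ∈ ss, s ≠ 0) :
    ∀ (n k : Nat) (acc : List Int), ss.length - k = n → k ≤ ss.length →
    (PySem.List.pyRange (k : Int) (ss.length : Int) 1).foldl (buildStep ps ss) (some acc)
      = some (acc ++ ((ps.drop k).zip (ss.drop k)).map (fun q => pyCeil100 q.1 q.2)) := by
  intro n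
  induction n with
  | zero =>
    intro k acc hn hk
    have hkk : k = ss.length := by omega
    subst hkk
    rw [PySem.List.pyRange_one_eq_nil (by omega)]
    simp [List.drop_eq_nil_of_le (le_refl ss.length)]
  | succ m ih =>
    intro k acc hn hk
    have hklt : k < ss.length := by omega
    have hkp : k < ps.length := by omega
    rw [PySem.List.pyRange_one_cons (by exact_mod_cast hklt)]
    have h1 : ((k : Int) + 1) = ((k + 1 : Nat) : Int) := by push_cast; ring
    have hget1 : PySem.List.pyGet? ps (k : Int) = some ps[k] := by
      simp [pysem, hkp]
    have hget2 : PySem.List.pyGet? ss (k : Int) = some ss[k] := by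
      simp [pysem, hklt]
    have hz' : ss[k] ≠ 0 := hz _ (List.getElem_mem hklt)
    simp only [List.foldl_cons, buildStep, hget1, hget2, if_neg hz', h1]
    rw [ih (k + 1) (acc ++ [pyCeil100 ps[k] ss[k]]) (by omega) (by omega)]
    have hd : (List.drop k ps).zip (List.drop k ss)
        = (ps[k], ss[k]) :: (List.drop (k+1) ps).zip (List.drop (k+1) ss) := by
      rw [List.drop_eq_getElem_cons hkp, List.drop_eq_getElem_cons hklt, List.zip_cons_cons]
    rw [hd]; simp

-- structural form of B's prefix-maxima loop
def pmax (m : Int) : List Int → List Int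
  | [] => []
  | d :: ds => (max m d) :: pmax (max m d) ds

lemma pmaxStep_eq (ds : List Int) : ∀ (m : Int) (acc : List Int),
    (ds.foldl pmaxStep (m, acc)).2 = acc ++ pmax m ds := by
  induction ds with
  | nil => intro m acc; simp [pmax]
  | cons d ds ih =>
    intro m acc
    simp only [List.foldl_cons, pmaxStep, pmax, ih]
    have : (if d > m then d else m) = max m d := by omega
    simp [this]

-- A's grouping loop computes the run-length encoding of the prefix maxima
lemma group_eq (ds : List Int) : ∀ (a cnt : Int) (ans : List Int),
    groupLoop ds a cnt ans
      = ans ++ (cnt + (((pmax a ds).takeWhile (· == a)).length : Int))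
          :: rleLoop ((pmax a ds).dropWhile (· == a)) := by
  induction ds with
  | nil => intro a cnt ans; simp [groupLoop, pmax, rleLoop]
  | cons d ds ih =>
    intro a cnt ans
    by_cases hgt : d > a
    · have hmax : max a d = d := by omega
      have hne : (d == a) = false := by simp; omega
      simp only [groupLoop, if_pos hgt, pmax, hmax, List.takeWhile_cons, hne,
        List.dropWhile_cons, ih]
      simp [rleLoop]
    · have hmax : max a d = a := by omega
      have heq : (a == a) = true := by simp
      simp only [groupLoop, if_neg hgt, pmax, hmax, List.takeWhile_cons, heq,
        List.dropWhile_cons, ih]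
      simp; ring

-- ===== VERDICT (by name: the statement is the Claim_ definition above) =====
theorem solution_spec : Claim_equal_solution := by
  intro ps ss _ hpre
  obtain ⟨hne, hlen, hz⟩ := hpre
  unfold Spec_solution solution solution_alt
  have hb := build_eq ps ss hlen hz ss.length 0 [] (by omega) (by omega)
  simp only [Nat.cast_zero] at hb
  rw [hb]
  have hsspos : 0 < ss.length := List.length_pos_of_ne_nil hne
  have hps : ps ≠ [] := List.ne_nil_of_length_pos (by omega)
  obtain ⟨p0, ps', hps'⟩ := List.exists_cons_of_ne_nil hps
  obtain ⟨s0, ss', hss'⟩ := List.exists_cons_of_ne_nil hne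
  subst hps' hss'
  simp only [List.drop_zero, List.zip_cons_cons, List.map_cons, List.nil_append, day_eq]
  rw [group_eq, pmaxStep_eq]
  simp only [pmax, max_self, List.nil_append]
  rw [rleLoop]
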